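-- pv_equiv track=rewrite | github.com/bluechen8/cs265-bril | project/to_ssa.py | intersect_sets
-- ===== SOURCE A (Python) =====
-- import copy
--
-- def intersect_sets(sets, pos=False):
--     if len(sets) == 0:
--         return set()
--     # pick a non-empty set
--     intersect_items = set()
--     for s in sets:
--         if len(s) > 0:
--             intersect_items = copy.deepcopy(s)
--             break
--     for s in sets:
--         if pos and len(s) == 0:
--             continue
--         intersect_items.intersection_update(s)
--     return intersect_items
-- ===== SOURCE B (Python) =====
-- def intersect_sets(sets, pos=False):
--     # Counting algorithm: an element is in the intersection of the candidate
--     # sets iff it occurs in all of them; count occurrences across a flattened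
--     # pass and keep the elements whose count equals the number of candidates.
--     candidates = [s for s in sets if s or not pos]
--     if not candidates:
--         return set()
--     counts = {}
--     for x in (e for s in candidates for e in s):
--         counts[x] = counts.get(x, 0) + 1
--     n = len(candidates)
--     return {x for x, c in counts.items() if c == n}
-- ===== Notes on version B (the rewrite author's own statement) =====
-- stated objective: alternative
-- what changed: B replaces A's find-first-non-empty + deepcopy + repeated intersection_update by a counting algorithm: one flattened pass tallies each element's occurrences across the candidate sets and keeps the elements whose count equals the number of candidates; Pre_ only states the set-encoding invariant (inner lists are duplicate-free, as they encode Python sets).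
import Mathlib
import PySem

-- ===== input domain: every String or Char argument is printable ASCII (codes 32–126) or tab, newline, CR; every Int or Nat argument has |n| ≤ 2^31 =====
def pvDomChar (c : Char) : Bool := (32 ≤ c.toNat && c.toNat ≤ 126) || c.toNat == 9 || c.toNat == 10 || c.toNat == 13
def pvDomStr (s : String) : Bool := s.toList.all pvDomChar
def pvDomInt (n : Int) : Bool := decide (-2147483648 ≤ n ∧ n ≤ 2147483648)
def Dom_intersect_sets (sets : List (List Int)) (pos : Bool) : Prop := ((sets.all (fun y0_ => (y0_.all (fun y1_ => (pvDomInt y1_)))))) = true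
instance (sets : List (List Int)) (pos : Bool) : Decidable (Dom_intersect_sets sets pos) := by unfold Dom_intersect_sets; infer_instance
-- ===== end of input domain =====

-- B replaces A's repeated-intersection loop (find first non-empty set, deepcopy it,
-- intersection_update against every set) by a counting algorithm: one flattened pass
-- counts each element's occurrences across the candidate sets and keeps the elements
-- whose count equals the number of candidates (objective: alternative).

-- ===== PORT A =====
-- first loop of A: scan for the first non-empty set (break), else keep set()
def intersect_sets_pick (sets : List (List Int)) : List Int :=
  match sets with
  | [] => []
  | s :: rest => if s.length > 0 then s else intersect_sets_pick rest

def intersect_sets (sets : List (List Int)) (pos : Bool) : List Int :=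
  if sets.length = 0 then []
  else
    -- intersect_items = deepcopy of first non-empty set (or set())
    let intersect_items := intersect_sets_pick sets
    -- second loop: skip empty sets when pos, else intersection_update
    sets.foldl (fun acc s => if pos && s.length == 0 then acc else PySem.Set.inter acc s) intersect_items

-- ===== PORT B =====
def intersect_sets_alt (sets : List (List Int)) (pos : Bool) : List Int :=
  let candidates := sets.filter (fun s => !s.isEmpty || !pos)
  if candidates.isEmpty then []
  else
    -- counts[x] = counts.get(x, 0) + 1 over the flattened candidates
    let counts := (candidates.flatMap (fun s => s)).foldl
      (fun d x => d.insert x (d.getD x 0 + 1)) PySem.Dict.empty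
    let n : Int := candidates.length
    PySem.Set.ofList ((counts.items.filter (fun p => p.2 == n)).map Prod.fst)

-- ===== PRECONDITION & SPEC =====
-- Pre_ only states the set-encoding invariant of the type convention: each inner list
-- encodes a Python set, so it holds its elements without duplicates (Nodup); a list with
-- duplicates does not correspond to any Python input of A (whose arguments are sets).
def Pre_intersect_sets (sets : List (List Int)) (pos : Bool) : Prop :=
  ∀ s ∈ sets, s.Nodup
instance (sets : List (List Int)) (pos : Bool) : Decidable (Pre_intersect_sets sets pos) := by unfold Pre_intersect_sets; infer_instance

def pvWitness_intersect_sets : List (List Int) × Bool := ([[1, 2, 3], [], [2, 3, 4]], true)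

def Spec_intersect_sets (sets : List (List Int)) (pos : Bool) (out : List Int) : Prop := out = intersect_sets_alt sets pos
instance (sets : List (List Int)) (pos : Bool) (out : List Int) : Decidable (Spec_intersect_sets sets pos out) := by unfold Spec_intersect_sets; infer_instance

-- ===== CLAIM (what is proved, stated in full; the proofs are below) =====
def Claim_equal_intersect_sets : Prop := ∀ (sets : List (List Int)) (pos : Bool), Dom_intersect_sets sets pos → Pre_intersect_sets sets pos → Spec_intersect_sets sets pos (intersect_sets sets pos)

-- ===== LEMMAS AND PROOFS =====

theorem inter_self (s : List Int) : PySem.Set.inter s s = s := by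
  simp [PySem.Set.inter, List.filter_eq_self]

-- A's fold of intersections is a filter of the seed by membership in every set
theorem foldl_inter_eq_filter (cs : List (List Int)) (c : List Int) :
    cs.foldl PySem.Set.inter c
      = c.filter (fun e => cs.all (fun s => PySem.Set.contains s e)) := by
  induction cs generalizing c with
  | nil => simp
  | cons s rest ih =>
    rw [List.foldl_cons, ih]
    show (PySem.Set.inter c s).filter _ = _
    simp only [PySem.Set.inter, List.filter_filter, List.all_cons]
    exact List.filter_congr (fun e _ => by rw [Bool.and_comm])

-- the count of e across the flattened Nodup lists = the number of lists containing e
theorem count_flatMap_eq_countP (L : List (List Int)) (hL : ∀ s ∈ L, s.Nodup) (e : Int) :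
    (L.flatMap (fun s => s)).count e = L.countP (fun s => decide (e ∈ s)) := by
  induction L with
  | nil => rfl
  | cons s rest ih =>
    rw [List.flatMap_cons, List.count_append, List.countP_cons,
      ih (fun t ht => hL t (List.mem_cons_of_mem s ht))]
    by_cases h : e ∈ s
    · rw [List.count_eq_one_of_mem (hL s List.mem_cons_self) h]
      simp [h, Nat.add_comm]
    · rw [List.count_eq_zero_of_not_mem h]
      simp [h]

-- filtering the flattened dedup by "count = number of candidates" keeps exactly the
-- elements of the first candidate lying in every candidate
theorem filter_ofList_flat (c : List Int) (cs : List (List Int)) (hc : c.Nodup) :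
    (PySem.Set.ofList (c ++ cs.flatMap (fun s => s))).filter
        (fun k => (c :: cs).countP (fun s => decide (k ∈ s)) == (c :: cs).length)
      = c.filter (fun e => cs.all (fun s => PySem.Set.contains s e)) := by
  rw [PySem.Set.ofList_append]
  rw [PySem.Set.ofList_eq_self_of_nodup c hc]
  rw [PySem.Set.update_eq_append_filter, List.filter_append]
  have hnew : ((PySem.Set.ofList (cs.flatMap (fun s => s))).filter
      (fun y => !PySem.Set.contains c y)).filter
      (fun k => (c :: cs).countP (fun s => decide (k ∈ s)) == (c :: cs).length) = [] := by
    rw [List.filter_eq_nil_iff]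
    intro k hk hq'
    have hkc : k ∉ c := by
      have h2 := (List.mem_filter.1 hk).2
      simp only [PySem.Set.contains_eq_listContains, List.contains_eq_mem, Bool.not_eq_eq_eq_not,
        Bool.not_true, decide_eq_false_iff_not] at h2
      exact h2
    rw [beq_iff_eq, List.countP_cons] at hq'
    simp only [hkc, decide_false, Bool.false_eq_true, if_false, List.length_cons] at hq'
    have := List.countP_le_length (l := cs) (p := fun s => decide (k ∈ s))
    omega
  rw [hnew, List.append_nil]
  refine List.filter_congr (fun e he => ?_)
  rw [List.countP_cons]
  simp only [he, decide_true, if_pos, List.length_cons]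
  have hle := List.countP_le_length (l := cs) (p := fun s => decide (e ∈ s))
  rw [Bool.eq_iff_iff, beq_iff_eq, List.all_eq_true]
  constructor
  · intro h s hs
    have : List.countP (fun s => decide (e ∈ s)) cs = cs.length := by omega
    have := List.countP_eq_length.1 this s hs
    simp only [PySem.Set.contains_eq_listContains, List.contains_eq_mem]
    exact this
  · intro h
    have : List.countP (fun s => decide (e ∈ s)) cs = cs.length := by
      refine List.countP_eq_length.2 (fun s hs => ?_)
      have := h s hs
      simpa [PySem.Set.contains_eq_listContains, List.contains_eq_mem] using this
    omega

-- THE BRIDGE: on a non-empty list of Nodup lists, B's counting expression equals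
-- A's repeated intersection seeded with the head.
theorem count_core_eq_foldl_inter (c : List Int) (cs : List (List Int))
    (hc : c.Nodup) (hcs : ∀ s ∈ cs, s.Nodup) :
    PySem.Set.ofList
      (((((c :: cs).flatMap (fun s => s)).foldl
          (fun d x => d.insert x (d.getD x 0 + 1)) PySem.Dict.empty).items.filter
          (fun p => p.2 == ((c :: cs).length : Int))).map Prod.fst)
      = cs.foldl PySem.Set.inter c := by
  have hall : ∀ s ∈ c :: cs, s.Nodup := by
    intro s hs
    rcases List.mem_cons.1 hs with h | h
    · exact h ▸ hc
    · exact hcs s h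
  rw [PySem.Dict.foldl_insert_getD_add_one_eq_counter, PySem.Dict.items_counter,
    List.filter_map, List.map_map]
  have hcomp : (Prod.fst ∘ fun k : Int => (k, (((c :: cs).flatMap (fun s => s)).count k : Int))) = id := rfl
  rw [hcomp, List.map_id]
  have hq : ∀ k : Int, ((fun p : Int × Int => p.2 == ((c :: cs).length : Int)) ∘
      (fun k => (k, (((c :: cs).flatMap (fun s => s)).count k : Int)))) k
      = ((c :: cs).countP (fun s => decide (k ∈ s)) == (c :: cs).length) := by
    intro k
    simp only [Function.comp, count_flatMap_eq_countP _ hall, beq_eq_decide]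
    rw [decide_eq_decide]
    omega
  rw [List.filter_congr (fun k _ => hq k), List.flatMap_cons, filter_ofList_flat c cs hc,
    PySem.Set.ofList_eq_self_of_nodup _ (List.Nodup.filter _ hc), foldl_inter_eq_filter]

-- skipping empty sets in the fold = folding over the non-empty sets
theorem fold_skip (l : List (List Int)) (init : List Int) :
    l.foldl (fun acc s => if s.length == 0 then acc else PySem.Set.inter acc s) init
      = (l.filter (fun s => !s.isEmpty)).foldl PySem.Set.inter init := by
  induction l generalizing init with
  | nil => rfl
  | cons s rest ih =>
    by_cases h : s = []
    · subst h
      rw [List.foldl_cons, if_pos (by decide : ((List.length ([]:List Int) == 0) = true)),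
        show List.filter (fun s => !s.isEmpty) ([] :: rest) = List.filter (fun s => !s.isEmpty) rest
          from by simp]
      exact ih init
    · have h0 : (s.length == 0) = false := by simp [List.length_eq_zero_iff, h]
      have hs : s.isEmpty = false := by simp [List.isEmpty_eq_false_iff, h]
      simp only [List.foldl_cons, h0, Bool.false_eq_true, if_false, List.filter_cons, hs,
        Bool.not_false]
      exact ih _

-- the first non-empty set is the head of the non-empty filter
theorem pick_eq_head (sets : List (List Int)) :
    intersect_sets_pick sets
      = ((sets.filter (fun s => !s.isEmpty)).headD []) := by
  induction sets with
  | nil => rfl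
  | cons s rest ih =>
    by_cases h : s = []
    · subst h; simpa [intersect_sets_pick] using ih
    · have : s.length > 0 := List.length_pos_iff.mpr h
      simp [intersect_sets_pick, this, h]

-- once the accumulator is empty, the intersection fold stays empty
theorem fold_inter_nil (l : List (List Int)) :
    l.foldl PySem.Set.inter ([] : List Int) = [] := by
  induction l with
  | nil => rfl
  | cons s rest ih => simpa [PySem.Set.inter] using ih

theorem intersect_sets_spec_aux (sets : List (List Int)) (pos : Bool)
    (hpre : ∀ s ∈ sets, s.Nodup) :
    intersect_sets sets pos = intersect_sets_alt sets pos := by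
  cases sets with
  | nil => cases pos <;> rfl
  | cons s rest =>
    unfold intersect_sets intersect_sets_alt
    rw [if_neg (by simp : ¬ ((s :: rest).length = 0))]
    cases pos with
    | true =>
      simp only [Bool.true_and, Bool.not_true, Bool.or_false]
      rw [fold_skip, pick_eq_head]
      cases hf : (s :: rest).filter (fun t => !t.isEmpty) with
      | nil => simp
      | cons c cs =>
        have hsub : ∀ t ∈ c :: cs, t.Nodup := by
          intro t ht
          exact hpre t (List.mem_of_mem_filter (hf ▸ ht))
        simp only [List.isEmpty_cons, List.headD_cons, List.foldl_cons, inter_self,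
          Bool.false_eq_true, if_false]
        exact (count_core_eq_foldl_inter c cs (hsub c List.mem_cons_self)
          (fun t ht => hsub t (List.mem_cons_of_mem c ht))).symm
    | false =>
      simp only [Bool.false_and, Bool.false_eq_true, if_false, Bool.not_false,
        Bool.or_true, List.filter_true, List.isEmpty_cons]
      by_cases h : s = []
      · subst h
        rw [List.foldl_cons,
          show PySem.Set.inter (intersect_sets_pick ([] :: rest)) [] = [] from by
            simp [PySem.Set.inter, PySem.Set.contains],
          fold_inter_nil,
          count_core_eq_foldl_inter [] rest List.nodup_nil
            (fun t ht => hpre t (List.mem_cons_of_mem [] ht)), fold_inter_nil]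
      · have hp : intersect_sets_pick (s :: rest) = s := by
          have : s.length > 0 := List.length_pos_iff.mpr h
          simp [intersect_sets_pick, this]
        rw [hp, List.foldl_cons, inter_self,
          count_core_eq_foldl_inter s rest (hpre s List.mem_cons_self)
            (fun t ht => hpre t (List.mem_cons_of_mem s ht))]

-- ===== VERDICT (by name: the statement is the Claim_ definition above) =====
theorem intersect_sets_spec : Claim_equal_intersect_sets := by
  intro sets pos _ hpre
  unfold Spec_intersect_sets
  exact intersect_sets_spec_aux sets pos hpre
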